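-- pv_equiv track=rewrite | github.com/andrijacenicelfak/vestacka-inteligencija | Lab4/zad10.py | rekurzivno
-- ===== SOURCE A (Python) =====
-- def ima_u_tabli(tabla, domina):
--     pronadjene = list()
--     for i in range(4):
--         for j in range(4):
--             if domina[0] == tabla[i][j] and domina[1] == tabla[i][j+1]:
--                 pronadjene.append(((i, j), False))
--     for i in range(3):
--         for j in range(5):
--             if domina[0] == tabla[i][j] and domina[1] == tabla[i+1][j]:
--                 pronadjene.append(((i, j), True))
--     return pronadjene
--
-- def rekurzivno(tabla, domine, koraci, i=0):
--     if len(domine) == 0: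
--         return (True, koraci)
--
--     for trenutno in domine:
--         lokacije = ima_u_tabli(tabla, trenutno)
--         if (len(lokacije) == 0):
--             continue
--         for lokacija in lokacije:
--             nova_tabla = [x[:] for x in tabla]
--             nova_tabla[lokacija[0][0]][lokacija[0][1]] = 'x'
--             if not lokacija[1]:
--                 nova_tabla[lokacija[0][0]][lokacija[0][1]+1] = 'x'
--             else:
--                 nova_tabla[lokacija[0][0]+1][lokacija[0][1]] = 'x'
--             domine_za_prosledjivanje = list(filter(lambda a : a != (trenutno[1], trenutno[0]) and a != trenutno, domine[:]))
--             novi_koraci = [*koraci, (trenutno, lokacija),]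
--             moguce = rekurzivno(nova_tabla, domine_za_prosledjivanje, novi_koraci, i+1)
--             if moguce[0]:
--                 return (True, moguce[1])
--     return (False, None)
-- ===== SOURCE B (Python) =====
-- # B: iterative DFS with an explicit LIFO stack of (board, dominoes, steps, depth)
-- # frames instead of recursion; children are pushed in reverse so they are popped
-- # in the original forward order, preserving the exact first-found solution.
-- def ima_u_tabli(tabla, domina):
--     pronadjene = list()
--     for i in range(4):
--         for j in range(4):
--             if domina[0] == tabla[i][j] and domina[1] == tabla[i][j+1]:
--                 pronadjene.append(((i, j), False))
--     for i in range(3):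
--         for j in range(5):
--             if domina[0] == tabla[i][j] and domina[1] == tabla[i+1][j]:
--                 pronadjene.append(((i, j), True))
--     return pronadjene
--
-- def rekurzivno(tabla, domine, koraci, i=0):
--     stack = [(tabla, domine, koraci, i)]
--     while stack:
--         t, d, k, depth = stack.pop()
--         if len(d) == 0:
--             return (True, k)
--         children = []
--         for trenutno in d:
--             for lokacija in ima_u_tabli(t, trenutno):
--                 nt = [row[:] for row in t]
--                 nt[lokacija[0][0]][lokacija[0][1]] = 'x'
--                 if not lokacija[1]:
--                     nt[lokacija[0][0]][lokacija[0][1]+1] = 'x'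
--                 else:
--                     nt[lokacija[0][0]+1][lokacija[0][1]] = 'x'
--                 nd = [a for a in d if a != (trenutno[1], trenutno[0]) and a != trenutno]
--                 children.append((nt, nd, [*k, (trenutno, lokacija)], depth+1))
--         stack.extend(reversed(children))
--     return (False, None)
-- ===== Notes on version B (the rewrite author's own statement) =====
-- stated objective: alternative
-- what changed: The recursive backtracker is replaced by an iterative depth-first search over an explicit LIFO stack of (board, dominoes, steps, depth) frames, with child frames pushed in reverse so they are popped in the original forward order and the same first-found solution is returned.
import Mathlib
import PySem

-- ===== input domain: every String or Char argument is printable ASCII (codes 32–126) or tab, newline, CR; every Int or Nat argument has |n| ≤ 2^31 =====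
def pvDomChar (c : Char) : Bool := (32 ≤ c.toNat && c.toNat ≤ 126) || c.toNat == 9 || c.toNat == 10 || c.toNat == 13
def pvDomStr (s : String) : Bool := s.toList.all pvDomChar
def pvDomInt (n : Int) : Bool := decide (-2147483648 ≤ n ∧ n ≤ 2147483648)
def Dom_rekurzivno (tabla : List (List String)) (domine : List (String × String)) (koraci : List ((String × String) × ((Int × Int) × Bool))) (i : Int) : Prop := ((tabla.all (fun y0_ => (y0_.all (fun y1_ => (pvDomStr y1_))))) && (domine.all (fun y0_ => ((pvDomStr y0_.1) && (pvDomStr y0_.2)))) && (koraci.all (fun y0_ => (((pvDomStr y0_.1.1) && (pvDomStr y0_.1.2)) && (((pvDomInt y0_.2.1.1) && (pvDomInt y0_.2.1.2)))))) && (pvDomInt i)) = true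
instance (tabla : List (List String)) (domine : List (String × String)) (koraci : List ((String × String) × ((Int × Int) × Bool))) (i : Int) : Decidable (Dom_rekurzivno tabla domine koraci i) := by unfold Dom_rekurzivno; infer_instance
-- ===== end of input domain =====

-- B replaces A's recursion by an iterative DFS over an explicit LIFO stack of frames
-- (objective: alternative decomposition; same search order, same return value).

abbrev PvKoraci := List ((String × String) × ((Int × Int) × Bool))
abbrev PvRes := Bool × Option PvKoraci
abbrev PvFrame := List (List String) × List (String × String) × PvKoraci × Int

-- ===== PORT A =====
-- helper ima_u_tabli (shared verbatim by both Pythons); pyGetD is exact for the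
-- in-range indices guaranteed by Pre_ (outside Pre_ the Python raises IndexError)
def imaUTabli (tabla : List (List String)) (domina : String × String) : List ((Int × Int) × Bool) :=
  (PySem.List.pyRange 0 3 1).foldl (fun acc i =>
      (PySem.List.pyRange 0 5 1).foldl (fun acc j =>
        if domina.1 = PySem.List.pyGetD (PySem.List.pyGetD tabla i []) j "" ∧
           domina.2 = PySem.List.pyGetD (PySem.List.pyGetD tabla (i+1) []) j ""
        then acc ++ [((i, j), true)] else acc) acc)
    ((PySem.List.pyRange 0 4 1).foldl (fun acc i =>
      (PySem.List.pyRange 0 4 1).foldl (fun acc j =>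
        if domina.1 = PySem.List.pyGetD (PySem.List.pyGetD tabla i []) j "" ∧
           domina.2 = PySem.List.pyGetD (PySem.List.pyGetD tabla i []) (j+1) ""
        then acc ++ [((i, j), false)] else acc) acc) [])

-- nova_tabla: row-copied board with the placed domino written as 'x' (shared inline code of both Pythons)
def postavi (tabla : List (List String)) (lokacija : (Int × Int) × Bool) : List (List String) :=
  let r := lokacija.1.1
  let c := lokacija.1.2
  let t1 := PySem.List.pySetD tabla r (PySem.List.pySetD (PySem.List.pyGetD tabla r []) c "x")
  if !lokacija.2 then
    PySem.List.pySetD t1 r (PySem.List.pySetD (PySem.List.pyGetD t1 r []) (c+1) "x")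
  else
    PySem.List.pySetD t1 (r+1) (PySem.List.pySetD (PySem.List.pyGetD t1 (r+1) []) c "x")

-- domine_za_prosledjivanje (shared inline code of both Pythons)
def noveDomine (domine : List (String × String)) (trenutno : String × String) : List (String × String) :=
  domine.filter (fun a => decide (a ≠ (trenutno.2, trenutno.1) ∧ a ≠ trenutno))

-- A's recursion, with fuel as the totality guard (one unit per recursion level;
-- fuel = domine.length + 1 always suffices because the filter strictly shrinks domine)
mutual
def rekCore : Nat → List (List String) → List (String × String) → PvKoraci → Int → PvRes
  | 0, _, _, _, _ => (false, none)
  | Nat.succ f, tabla, domine, koraci, i =>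
      if domine.length = 0 then (true, some koraci)
      else outerA f tabla domine koraci i domine
  termination_by f _ _ _ _ => (f, 0, 0)

def outerA (f : Nat) (tabla : List (List String)) (domine : List (String × String)) (koraci : PvKoraci) (i : Int) : List (String × String) → PvRes
  | [] => (false, none)
  | trenutno :: rest =>
      let lokacije := imaUTabli tabla trenutno
      if lokacije.length = 0 then outerA f tabla domine koraci i rest
      else match innerA f tabla domine koraci i trenutno lokacije with
        | some r => r
        | none => outerA f tabla domine koraci i rest
  termination_by l => (f, 2, l.length)

def innerA (f : Nat) (tabla : List (List String)) (domine : List (String × String)) (koraci : PvKoraci) (i : Int) (trenutno : String × String) : List ((Int × Int) × Bool) → Option PvRes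
  | [] => none
  | lokacija :: ls =>
      let m := rekCore f (postavi tabla lokacija) (noveDomine domine trenutno) (koraci ++ [(trenutno, lokacija)]) (i + 1)
      if m.1 then some (true, m.2) else innerA f tabla domine koraci i trenutno ls
  termination_by l => (f, 1, l.length)
end

def rekurzivno (tabla : List (List String)) (domine : List (String × String)) (koraci : List ((String × String) × ((Int × Int) × Bool))) (i : Int) : Bool × (Option (List ((String × String) × ((Int × Int) × Bool)))) :=
  rekCore (domine.length + 1) tabla domine koraci i

-- ===== PORT B =====
-- one child frame per (trenutno, lokacija) placement
def dete (tabla : List (List String)) (domine : List (String × String)) (koraci : PvKoraci) (i : Int) (trenutno : String × String) (lokacija : (Int × Int) × Bool) : PvFrame :=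
  (postavi tabla lokacija, noveDomine domine trenutno, koraci ++ [(trenutno, lokacija)], i + 1)

-- the children list, in the forward order in which B's stack pops them
def deca (tabla : List (List String)) (domine : List (String × String)) (koraci : PvKoraci) (i : Int) : List PvFrame :=
  domine.flatMap (fun trenutno => (imaUTabli tabla trenutno).map (dete tabla domine koraci i trenutno))

-- fuel bound for the stack loop: an over-approximation of the number of frames
-- a frame with n dominoes can ever put on the stack (each frame has ≤ 31·n children)
def mera : Nat → Nat
  | 0 => 1
  | n + 1 => 31 * (n + 1) * mera n + 1

-- B's while-loop: pop a frame (head = top of stack); pushing the children reversed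
-- and popping from the end is exactly 'children ++ rest'
def runB : Nat → List PvFrame → PvRes
  | 0, _ => (false, none)
  | _ + 1, [] => (false, none)
  | f + 1, (t, d, k, dep) :: rest =>
      if d.length = 0 then (true, some k)
      else runB f (deca t d k dep ++ rest)

def rekurzivno_alt (tabla : List (List String)) (domine : List (String × String)) (koraci : List ((String × String) × ((Int × Int) × Bool))) (i : Int) : Bool × (Option (List ((String × String) × ((Int × Int) × Bool)))) :=
  runB (mera domine.length + 1) [(tabla, domine, koraci, i)]

-- ===== PRECONDITION & SPEC =====
-- Pre_ excludes boards with fewer than 4 rows, or a row shorter than 5 among the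
-- first four, whenever dominoes are present: on those A's unconditional board scan
-- in ima_u_tabli generally raises IndexError (short-circuit equality lets a few such
-- boards return (False, None) anyway — see the cited example; B behaves identically
-- there in Python).
def Pre_rekurzivno (tabla : List (List String)) (domine : List (String × String)) (koraci : List ((String × String) × ((Int × Int) × Bool))) (i : Int) : Prop :=
  domine = [] ∨ (4 ≤ tabla.length ∧ ∀ row ∈ tabla.take 4, 5 ≤ row.length)
instance (tabla : List (List String)) (domine : List (String × String)) (koraci : List ((String × String) × ((Int × Int) × Bool))) (i : Int) : Decidable (Pre_rekurzivno tabla domine koraci i) := by unfold Pre_rekurzivno; infer_instance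

def pvWitness_rekurzivno : List (List String) × (List (String × String)) × (List ((String × String) × ((Int × Int) × Bool))) × Int :=
  ([["z", "z", "z", "z", "z"], ["z", "z", "z", "z", "z"], ["z", "a", "b", "z", "z"], ["z", "z", "z", "z", "z"]], [("a", "b")], [], 0)

def Spec_rekurzivno (tabla : List (List String)) (domine : List (String × String)) (koraci : List ((String × String) × ((Int × Int) × Bool))) (i : Int) (out : Bool × (Option (List ((String × String) × ((Int × Int) × Bool))))) : Prop := out = rekurzivno_alt tabla domine koraci i
instance (tabla : List (List String)) (domine : List (String × String)) (koraci : List ((String × String) × ((Int × Int) × Bool))) (i : Int) (out : Bool × (Option (List ((String × String) × ((Int × Int) × Bool))))) : Decidable (Spec_rekurzivno tabla domine koraci i out) := by unfold Spec_rekurzivno; infer_instance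

-- ===== CLAIM (what is proved, stated in full; the proofs are below) =====
def Claim_equal_rekurzivno : Prop := ∀ (tabla : List (List String)) (domine : List (String × String)) (koraci : List ((String × String) × ((Int × Int) × Bool))) (i : Int), Dom_rekurzivno tabla domine koraci i → Pre_rekurzivno tabla domine koraci i → Spec_rekurzivno tabla domine koraci i (rekurzivno tabla domine koraci i)

-- ===== LEMMAS AND PROOFS =====

theorem pvWitness_ok : Dom_rekurzivno pvWitness_rekurzivno.1 pvWitness_rekurzivno.2.1 pvWitness_rekurzivno.2.2.1 pvWitness_rekurzivno.2.2.2 ∧ Pre_rekurzivno pvWitness_rekurzivno.1 pvWitness_rekurzivno.2.1 pvWitness_rekurzivno.2.2.1 pvWitness_rekurzivno.2.2.2 := by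
  constructor <;> decide

-- helper semantics for the proofs: frame-stack measure and the "enough fuel" run
def meraStog (s : List PvFrame) : Nat := (s.map (fun fr => mera fr.2.1.length)).sum

def korakB (s : List PvFrame) : PvRes := runB (meraStog s + 1) s

theorem mera_mono {m n : Nat} (h : m ≤ n) : mera m ≤ mera n := by
  induction n with
  | zero => have hm : m = 0 := Nat.le_zero.mp h; simp [hm]
  | succ n ih =>
    rcases Nat.lt_succ_iff_lt_or_eq.mp (Nat.lt_succ_of_le h) with h' | rfl
    · have h1 : mera m ≤ mera n := ih (by omega)
      have h2 : mera n ≤ 31 * (n + 1) * mera n := Nat.le_mul_of_pos_left _ (by omega)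
      simp only [mera]; omega
    · rfl

theorem meraStog_append (xs ys : List PvFrame) :
    meraStog (xs ++ ys) = meraStog xs + meraStog ys := by
  simp [meraStog]

theorem meraStog_cons (t : List (List String)) (d : List (String × String)) (k : PvKoraci)
    (dep : Int) (s : List PvFrame) :
    meraStog ((t, d, k, dep) :: s) = mera d.length + meraStog s := by
  simp [meraStog]

theorem noveDomine_lt {domine : List (String × String)} {trenutno : String × String}
    (h : trenutno ∈ domine) : (noveDomine domine trenutno).length < domine.length := by
  apply List.length_filter_lt_length_iff_exists.mpr
  exact ⟨trenutno, h, by simp⟩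

theorem foldl_len_le {α β : Type} (g : List α → β → List α) (k : Nat)
    (h : ∀ acc x, (g acc x).length ≤ acc.length + k) :
    ∀ (l : List β) (init : List α), (l.foldl g init).length ≤ init.length + k * l.length := by
  intro l
  induction l with
  | nil => simp
  | cons x t ih =>
    intro init
    calc ((x :: t).foldl g init).length = (t.foldl g (g init x)).length := rfl
      _ ≤ (g init x).length + k * t.length := ih _
      _ ≤ (init.length + k) + k * t.length := by have := h init x; omega
      _ = init.length + k * (x :: t).length := by simp [Nat.mul_succ]; ring

theorem imaUTabli_len_le (tabla : List (List String)) (domina : String × String) :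
    (imaUTabli tabla domina).length ≤ 31 := by
  have inner1 : ∀ (i : Int) (acc : List ((Int × Int) × Bool)),
      ((PySem.List.pyRange 0 4 1).foldl (fun acc j =>
        if domina.1 = PySem.List.pyGetD (PySem.List.pyGetD tabla i []) j "" ∧
           domina.2 = PySem.List.pyGetD (PySem.List.pyGetD tabla i []) (j + 1) ""
        then acc ++ [((i, j), false)] else acc) acc).length ≤ acc.length + 4 := by
    intro i acc
    have h := foldl_len_le
      (fun (acc : List ((Int × Int) × Bool)) (j : Int) =>
        if domina.1 = PySem.List.pyGetD (PySem.List.pyGetD tabla i []) j "" ∧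
           domina.2 = PySem.List.pyGetD (PySem.List.pyGetD tabla i []) (j + 1) ""
        then acc ++ [((i, j), false)] else acc) 1
      (by intro a x; dsimp only; split <;> simp) (PySem.List.pyRange 0 4 1) acc
    rw [PySem.List.length_pyRange_one] at h
    norm_num at h
    exact h
  have inner2 : ∀ (i : Int) (acc : List ((Int × Int) × Bool)),
      ((PySem.List.pyRange 0 5 1).foldl (fun acc j =>
        if domina.1 = PySem.List.pyGetD (PySem.List.pyGetD tabla i []) j "" ∧
           domina.2 = PySem.List.pyGetD (PySem.List.pyGetD tabla (i + 1) []) j ""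
        then acc ++ [((i, j), true)] else acc) acc).length ≤ acc.length + 5 := by
    intro i acc
    have h := foldl_len_le
      (fun (acc : List ((Int × Int) × Bool)) (j : Int) =>
        if domina.1 = PySem.List.pyGetD (PySem.List.pyGetD tabla i []) j "" ∧
           domina.2 = PySem.List.pyGetD (PySem.List.pyGetD tabla (i + 1) []) j ""
        then acc ++ [((i, j), true)] else acc) 1
      (by intro a x; dsimp only; split <;> simp) (PySem.List.pyRange 0 5 1) acc
    rw [PySem.List.length_pyRange_one] at h
    norm_num at h
    exact h
  have houter1 : ((PySem.List.pyRange 0 4 1).foldl (fun acc i =>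
      (PySem.List.pyRange 0 4 1).foldl (fun acc j =>
        if domina.1 = PySem.List.pyGetD (PySem.List.pyGetD tabla i []) j "" ∧
           domina.2 = PySem.List.pyGetD (PySem.List.pyGetD tabla i []) (j + 1) ""
        then acc ++ [((i, j), false)] else acc) acc) []).length ≤ 16 := by
    have h := foldl_len_le
      (fun (acc : List ((Int × Int) × Bool)) (i : Int) =>
        (PySem.List.pyRange 0 4 1).foldl (fun acc j =>
          if domina.1 = PySem.List.pyGetD (PySem.List.pyGetD tabla i []) j "" ∧
             domina.2 = PySem.List.pyGetD (PySem.List.pyGetD tabla i []) (j + 1) ""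
          then acc ++ [((i, j), false)] else acc) acc) 4
      (fun acc x => inner1 x acc) (PySem.List.pyRange 0 4 1) []
    rw [PySem.List.length_pyRange_one] at h
    norm_num at h
    exact h
  have h := foldl_len_le
    (fun (acc : List ((Int × Int) × Bool)) (i : Int) =>
      (PySem.List.pyRange 0 5 1).foldl (fun acc j =>
        if domina.1 = PySem.List.pyGetD (PySem.List.pyGetD tabla i []) j "" ∧
           domina.2 = PySem.List.pyGetD (PySem.List.pyGetD tabla (i + 1) []) j ""
        then acc ++ [((i, j), true)] else acc) acc) 5
    (fun acc x => inner2 x acc) (PySem.List.pyRange 0 3 1)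
    ((PySem.List.pyRange 0 4 1).foldl (fun acc i =>
      (PySem.List.pyRange 0 4 1).foldl (fun acc j =>
        if domina.1 = PySem.List.pyGetD (PySem.List.pyGetD tabla i []) j "" ∧
           domina.2 = PySem.List.pyGetD (PySem.List.pyGetD tabla i []) (j + 1) ""
        then acc ++ [((i, j), false)] else acc) acc) [])
  rw [PySem.List.length_pyRange_one] at h
  norm_num at h
  rw [imaUTabli]
  omega

theorem sum_map_le_len_mul {α : Type} (l : List α) (g : α → Nat) (c : Nat)
    (h : ∀ x ∈ l, g x ≤ c) : (l.map g).sum ≤ l.length * c := by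
  induction l with
  | nil => simp
  | cons a t ih =>
    simp only [List.map_cons, List.sum_cons, List.length_cons, Nat.succ_mul]
    have := h a (by simp)
    have := ih (fun x hx => h x (by simp [hx]))
    omega

theorem meraStog_flatMap {α : Type} (l : List α) (F : α → List PvFrame) :
    meraStog (l.flatMap F) = (l.map (fun x => meraStog (F x))).sum := by
  induction l with
  | nil => rfl
  | cons a t ih => simp [List.flatMap_cons, meraStog_append, ih]

theorem deca_mera_lt (tabla : List (List String)) (domine : List (String × String))
    (koraci : PvKoraci) (i : Int) (h : domine ≠ []) :
    meraStog (deca tabla domine koraci i) < mera domine.length := by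
  obtain ⟨n, hn⟩ : ∃ n, domine.length = n + 1 := by
    cases domine with
    | nil => simp at h
    | cons a t => exact ⟨t.length, by simp⟩
  have hper : ∀ tr ∈ domine,
      meraStog ((imaUTabli tabla tr).map (dete tabla domine koraci i tr)) ≤ 31 * mera n := by
    intro tr htr
    have hnd : (noveDomine domine tr).length ≤ n := by
      have := noveDomine_lt htr; omega
    have hm : mera (noveDomine domine tr).length ≤ mera n := mera_mono hnd
    have : meraStog ((imaUTabli tabla tr).map (dete tabla domine koraci i tr))
        = (imaUTabli tabla tr).length * mera (noveDomine domine tr).length := by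
      simp only [meraStog, List.map_map]
      have : ((fun fr : PvFrame => mera fr.2.1.length) ∘ dete tabla domine koraci i tr)
          = fun _ => mera (noveDomine domine tr).length := by
        funext loc; simp [dete]
      rw [this, List.map_const', List.sum_replicate, smul_eq_mul]
    rw [this]
    exact Nat.mul_le_mul (imaUTabli_len_le tabla tr) hm
  have hsum : meraStog (deca tabla domine koraci i) ≤ domine.length * (31 * mera n) := by
    rw [deca, meraStog_flatMap]
    exact sum_map_le_len_mul _ _ _ hper
  rw [hn] at hsum ⊢
  simp only [mera]
  have : (n + 1) * (31 * mera n) = 31 * (n + 1) * mera n := by ring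
  omega

theorem runB_mono : ∀ (f : Nat) (s : List PvFrame), meraStog s < f → runB f s = runB (f + 1) s := by
  intro f
  induction f with
  | zero => intro s h; have := Nat.not_lt_zero (meraStog s); omega
  | succ f ih =>
    intro s h
    match s with
    | [] => rfl
    | (t, d, k, dep) :: rest =>
      simp only [runB]
      by_cases hd : d.length = 0
      · simp [hd]
      · simp only [hd, if_false]
        apply ih
        have h1 : meraStog (deca t d k dep ++ rest) = meraStog (deca t d k dep) + meraStog rest :=
          meraStog_append _ _
        have h2 : meraStog (deca t d k dep) < mera d.length :=
          deca_mera_lt t d k dep (by intro hnil; simp [hnil] at hd)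
        have h3 : meraStog ((t, d, k, dep) :: rest) = mera d.length + meraStog rest :=
          meraStog_cons _ _ _ _ _
        omega

theorem runB_add : ∀ (j f : Nat) (s : List PvFrame), meraStog s < f → runB f s = runB (f + j) s := by
  intro j
  induction j with
  | zero => intro f s h; rfl
  | succ j ih =>
    intro f s h
    rw [ih f s h, runB_mono (f + j) s (by omega)]
    ring_nf

theorem runB_eq_korakB {f : Nat} {s : List PvFrame} (h : meraStog s < f) :
    runB f s = korakB s := by
  unfold korakB
  have := runB_add (f - (meraStog s + 1)) (meraStog s + 1) s (by omega)
  rw [this]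
  congr 1
  omega

theorem korakB_nil : korakB [] = (false, none) := rfl

theorem korakB_cons (t : List (List String)) (d : List (String × String)) (k : PvKoraci)
    (dep : Int) (rest : List PvFrame) :
    korakB ((t, d, k, dep) :: rest)
      = if d.length = 0 then (true, some k) else korakB (deca t d k dep ++ rest) := by
  conv_lhs => rw [korakB]
  rw [show meraStog ((t, d, k, dep) :: rest) + 1 = (mera d.length + meraStog rest) + 1 by
    rw [meraStog_cons]]
  simp only [runB]
  by_cases hd : d.length = 0
  · simp [hd]
  · simp only [hd, if_false]
    apply runB_eq_korakB
    rw [meraStog_append]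
    have := deca_mera_lt t d k dep (by intro hnil; simp [hnil] at hd)
    omega

theorem korakB_append : ∀ (n : Nat) (xs ys : List PvFrame), meraStog xs ≤ n →
    korakB (xs ++ ys) = if (korakB xs).1 then korakB xs else korakB ys := by
  intro n
  induction n using Nat.strong_induction_on with
  | _ n IH =>
    intro xs ys hxs
    match xs with
    | [] => simp [korakB_nil]
    | (t, d, k, dep) :: xs' =>
      by_cases hd : d.length = 0
      · rw [List.cons_append, korakB_cons, korakB_cons]
        simp [hd]
      · rw [List.cons_append, korakB_cons, korakB_cons]
        simp only [hd, if_false]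
        rw [← List.append_assoc]
        have hlt : meraStog (deca t d k dep ++ xs') < meraStog ((t, d, k, dep) :: xs') := by
          rw [meraStog_append, meraStog_cons]
          have := deca_mera_lt t d k dep (by intro hnil; simp [hnil] at hd)
          omega
        exact IH (meraStog (deca t d k dep ++ xs')) (by omega) _ ys (le_refl _)

theorem rekCore_irrel : ∀ (n : Nat) (tabla : List (List String)) (d : List (String × String))
    (k : PvKoraci) (i : Int) (f g : Nat), d.length ≤ n → n < f → n < g →
    rekCore f tabla d k i = rekCore g tabla d k i := by
  intro n
  induction n using Nat.strong_induction_on with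
  | _ n IH =>
    intro tabla d k i f g hlen hf hg
    obtain ⟨f', rfl⟩ : ∃ f', f = f' + 1 := ⟨f - 1, by omega⟩
    obtain ⟨g', rfl⟩ : ∃ g', g = g' + 1 := ⟨g - 1, by omega⟩
    simp only [rekCore]
    by_cases hd : d.length = 0
    · simp [hd]
    · simp only [hd, if_false]
      have hrec : ∀ (tr : String × String), tr ∈ d → ∀ (loc : (Int × Int) × Bool),
          rekCore f' (postavi tabla loc) (noveDomine d tr) (k ++ [(tr, loc)]) (i + 1)
            = rekCore g' (postavi tabla loc) (noveDomine d tr) (k ++ [(tr, loc)]) (i + 1) := by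
        intro tr htr loc
        have hlt := noveDomine_lt htr
        exact IH (noveDomine d tr).length (by omega) _ _ _ _ f' g' (le_refl _)
          (by omega) (by omega)
      have houter : ∀ (sub : List (String × String)), (∀ x ∈ sub, x ∈ d) →
          outerA f' tabla d k i sub = outerA g' tabla d k i sub := by
        intro sub
        induction sub with
        | nil => intro _; simp [outerA]
        | cons tr rest ihsub =>
          intro hmem
          have htr : tr ∈ d := hmem tr (by simp)
          have hrest := ihsub (fun x hx => hmem x (by simp [hx]))
          have hinner : ∀ (ls : List ((Int × Int) × Bool)),
              innerA f' tabla d k i tr ls = innerA g' tabla d k i tr ls := by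
            intro ls
            induction ls with
            | nil => simp [innerA]
            | cons loc ls ihls =>
              simp only [innerA]
              rw [hrec tr htr loc, ihls]
          simp only [outerA]
          rw [hinner, hrest]
      exact houter d (fun x hx => hx)

theorem rekCore_eq_korakB : ∀ (n : Nat) (tabla : List (List String))
    (d : List (String × String)) (k : PvKoraci) (i : Int), d.length ≤ n →
    rekCore (d.length + 1) tabla d k i = korakB [(tabla, d, k, i)] := by
  intro n
  induction n using Nat.strong_induction_on with
  | _ n IH =>
    intro tabla d k i hlen
    rw [korakB_cons]
    simp only [rekCore]
    by_cases hd : d.length = 0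
    · simp [hd]
    · simp only [hd, if_false]
      rw [List.append_nil]
      have hchild : ∀ (tr : String × String), tr ∈ d → ∀ (loc : (Int × Int) × Bool),
          rekCore d.length (postavi tabla loc) (noveDomine d tr) (k ++ [(tr, loc)]) (i + 1)
            = korakB [dete tabla d k i tr loc] := by
        intro tr htr loc
        have hlt := noveDomine_lt htr
        have h1 : rekCore d.length (postavi tabla loc) (noveDomine d tr) (k ++ [(tr, loc)]) (i + 1)
            = rekCore ((noveDomine d tr).length + 1) (postavi tabla loc) (noveDomine d tr)
                (k ++ [(tr, loc)]) (i + 1) :=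
          rekCore_irrel (noveDomine d tr).length _ _ _ _ _ _ (le_refl _) (by omega) (by omega)
        rw [h1, IH (noveDomine d tr).length (by omega) _ _ _ _ (le_refl _)]
        rfl
      have hinner : ∀ (tr : String × String), tr ∈ d →
          ∀ (ls : List ((Int × Int) × Bool)) (X : PvRes),
          (match innerA d.length tabla d k i tr ls with
            | some r => r
            | none => X)
            = if (korakB (ls.map (dete tabla d k i tr))).1
              then korakB (ls.map (dete tabla d k i tr)) else X := by
        intro tr htr ls
        induction ls with
        | nil => intro X; simp [innerA, korakB_nil]
        | cons loc ls ihls =>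
          intro X
          simp only [innerA]
          have hm := hchild tr htr loc
          rw [List.map_cons]
          have hsplit : korakB (dete tabla d k i tr loc :: ls.map (dete tabla d k i tr))
              = if (korakB [dete tabla d k i tr loc]).1
                then korakB [dete tabla d k i tr loc]
                else korakB (ls.map (dete tabla d k i tr)) := by
            have := korakB_append (meraStog [dete tabla d k i tr loc])
              [dete tabla d k i tr loc] (ls.map (dete tabla d k i tr)) (le_refl _)
            simpa using this
          rw [hsplit]
          by_cases hb : (rekCore d.length (postavi tabla loc) (noveDomine d tr)
              (k ++ [(tr, loc)]) (i + 1)).1 = true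
          · rw [← hm]
            simp only [hb, if_true]
            ext1 <;> simp [hb]
          · have hb' : (korakB [dete tabla d k i tr loc]).1 = false := by
              rw [← hm]; simp at hb; exact hb
            simp only [hb', Bool.false_eq_true, if_false]
            rw [show (rekCore d.length (postavi tabla loc) (noveDomine d tr)
                (k ++ [(tr, loc)]) (i + 1)).1 = false by simp at hb; exact hb]
            simp only [Bool.false_eq_true, if_false]
            exact ihls X
      have houter : ∀ (sub : List (String × String)), (∀ x ∈ sub, x ∈ d) →
          outerA d.length tabla d k i sub
            = korakB (sub.flatMap (fun tr => (imaUTabli tabla tr).map (dete tabla d k i tr))) := by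
        intro sub
        induction sub with
        | nil => intro _; simp [outerA, korakB_nil]
        | cons tr rest ihsub =>
          intro hmem
          have htr : tr ∈ d := hmem tr (by simp)
          have hrest := ihsub (fun x hx => hmem x (by simp [hx]))
          rw [List.flatMap_cons]
          have hsplit := korakB_append
            (meraStog ((imaUTabli tabla tr).map (dete tabla d k i tr)))
            ((imaUTabli tabla tr).map (dete tabla d k i tr))
            (rest.flatMap (fun tr => (imaUTabli tabla tr).map (dete tabla d k i tr)))
            (le_refl _)
          rw [hsplit]
          simp only [outerA]
          by_cases hloc : (imaUTabli tabla tr).length = 0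
          · have : imaUTabli tabla tr = [] := List.eq_nil_of_length_eq_zero hloc
            simp [this, korakB_nil, hrest]
          · simp only [hloc, if_false]
            rw [hinner tr htr (imaUTabli tabla tr) _, hrest]

      exact houter d (fun x hx => hx)

theorem rekurzivno_eq_alt (tabla : List (List String)) (domine : List (String × String))
    (koraci : List ((String × String) × ((Int × Int) × Bool))) (i : Int) :
    rekurzivno tabla domine koraci i = rekurzivno_alt tabla domine koraci i := by
  rw [rekurzivno, rekurzivno_alt,
    rekCore_eq_korakB domine.length tabla domine koraci i (le_refl _)]
  rw [korakB]
  simp [meraStog]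

-- ===== VERDICT (by name: the statement is the Claim_ definition above) =====
theorem rekurzivno_spec : Claim_equal_rekurzivno := by
  intro tabla domine koraci i _ _
  unfold Spec_rekurzivno
  exact rekurzivno_eq_alt tabla domine koraci i
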